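-- pv_equiv track=rewrite | github.com/spider-shadow-9/summer-python | 9th_home_2ndQ.py | calculate_floor
-- ===== SOURCE A (Python) =====
-- def calculate_floor(string):
--     x=string.split()
--     z=0
--     for i in x:
--         if i=="U":
--             z=z+1
--         elif i=="D":
--             z=z-1
--     return z
-- ===== SOURCE B (Python) =====
-- def calculate_floor(string):
--     padded = " " + string + " "
--     total = 0
--     for left, c, right in zip(padded, padded[1:], padded[2:]):
--         if left.isspace() and right.isspace():
--             if c == "U":
--                 total = total + 1
--             elif c == "D":
--                 total = total - 1
--     return total
-- ===== Notes on version B (the rewrite author's own statement) =====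
-- stated objective: alternative
-- what changed: B never splits the string: it pads it with spaces and scans a width-3 sliding window (zip of the padded string with its two shifts), counting 'U'/'D' characters whose both neighbours are whitespace, instead of A's split-then-accumulate loop over tokens.
import Mathlib
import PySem

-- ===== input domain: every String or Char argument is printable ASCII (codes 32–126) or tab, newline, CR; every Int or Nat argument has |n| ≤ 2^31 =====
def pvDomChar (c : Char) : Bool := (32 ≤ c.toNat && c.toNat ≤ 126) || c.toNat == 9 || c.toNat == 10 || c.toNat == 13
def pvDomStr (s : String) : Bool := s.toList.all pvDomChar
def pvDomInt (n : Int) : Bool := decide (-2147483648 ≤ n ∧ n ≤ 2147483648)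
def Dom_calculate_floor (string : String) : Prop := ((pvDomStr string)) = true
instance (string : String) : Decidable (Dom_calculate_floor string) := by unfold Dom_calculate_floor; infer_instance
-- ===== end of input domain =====

-- B never splits: it pads the string with spaces and scans a width-3 sliding window
-- (zip of the padded string with its two shifts), counting 'U'/'D' characters whose
-- both neighbours are whitespace (alternative decomposition; same cost).

-- ===== PORT A =====
def calculate_floor (string : String) : Int :=
  let x := PySem.Str.split₀ string
  x.foldl (fun z i => if i == "U" then z + 1 else if i == "D" then z - 1 else z) 0

-- ===== PORT B =====
-- padded = " " + string + " " (worked on as its character list);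
-- zip(padded, padded[1:], padded[2:]) → zip with the dropped-by-1/2 lists (exact:
-- Python zip truncates to the shortest, as List.zip does; s[k:] with 0 ≤ k is List.drop k);
-- left.isspace() on a one-character string is PySem.Chars.isspace of that character (exact).
def calculate_floor_alt (string : String) : Int :=
  let padded := (' ' :: string.toList) ++ [' ']
  let triples := padded.zip ((padded.drop 1).zip (padded.drop 2))
  triples.foldl (fun total t =>
    if PySem.Chars.isspace t.1 && PySem.Chars.isspace t.2.2 then
      if t.2.1 == 'U' then total + 1
      else if t.2.1 == 'D' then total - 1
      else total
    else total) 0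

-- ===== PRECONDITION & SPEC =====
def Spec_calculate_floor (string : String) (out : Int) : Prop := out = calculate_floor_alt string
instance (string : String) (out : Int) : Decidable (Spec_calculate_floor string out) := by unfold Spec_calculate_floor; infer_instance

-- ===== CLAIM (what is proved, stated in full; the proofs are below) =====
def Claim_equal_calculate_floor : Prop := ∀ (string : String), Dom_calculate_floor string → Spec_calculate_floor string (calculate_floor string)

-- ===== LEMMAS AND PROOFS =====

/-- Contribution of a single character ('U' = +1, 'D' = -1). -/
def udc (c : Char) : Int := if c = 'U' then 1 else if c = 'D' then -1 else 0

/-- Contribution of one token (as a character list). -/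
def tokC (t : List Char) : Int := if t = ['U'] then 1 else if t = ['D'] then -1 else 0

/-- Total contribution of a token list. -/
def tkSum (ts : List (List Char)) : Int := (ts.map tokC).sum

/-- What `split₀.go` still produces from the remaining characters and the pending token. -/
def hA : List Char → List Char → Int
  | [], cur => tokC cur.reverse
  | c :: rest, cur =>
    if PySem.Chars.isspace c then tokC cur.reverse + hA rest [] else hA rest (c :: cur)

/-- Sliding-window scan: `ps` says whether the previous character was whitespace. -/
def scanB : Bool → List Char → Int
  | _, [] => 0
  | ps, c :: rest =>
    (if ps && PySem.Chars.isspace (rest.headD ' ') then udc c else 0)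
      + scanB (PySem.Chars.isspace c) rest

/-- The width-3 windows over `prev :: cs ++ [' ']`. -/
def win : Char → List Char → List (Char × Char × Char)
  | _, [] => []
  | prev, c :: rest => (prev, c, rest.headD ' ') :: win c rest

theorem udc_space (c : Char) (h : PySem.Chars.isspace c = true) : udc c = 0 := by
  by_cases h1 : c = 'U'
  · subst h1; simp [PySem.Chars.isspace] at h
  · by_cases h2 : c = 'D'
    · subst h2; simp [PySem.Chars.isspace] at h
    · simp [udc, h1, h2]

theorem foldl_tokens (ts : List (List Char)) (z : Int) :
    (ts.map String.ofList).foldl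
        (fun z i => if i == "U" then z + 1 else if i == "D" then z - 1 else z) z
      = z + tkSum ts := by
  induction ts generalizing z with
  | nil => simp [tkSum]
  | cons t rest ih =>
    have hU : (String.ofList t = "U") ↔ t = ['U'] := by
      constructor
      · intro h; have := congrArg String.toList h; simpa using this
      · intro h; subst h; rfl
    have hD : (String.ofList t = "D") ↔ t = ['D'] := by
      constructor
      · intro h; have := congrArg String.toList h; simpa using this
      · intro h; subst h; rfl
    simp only [List.map_cons, List.foldl_cons, ih, tkSum, List.map_cons, List.sum_cons]
    by_cases h1 : t = ['U']
    · simp [h1, tokC]; ring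
    · by_cases h2 : t = ['D']
      · simp [h2, tokC]
        ring
      · simp [beq_iff_eq, hU, hD, h1, h2, tokC]

theorem tkSum_go (cs : List Char) (cur : List Char) (acc : List (List Char)) :
    tkSum (PySem.Chars.split₀.go cs cur acc) = tkSum acc + hA cs cur := by
  induction cs generalizing cur acc with
  | nil =>
    by_cases h : cur.isEmpty
    · have hc : cur = [] := List.isEmpty_iff.mp h
      subst hc
      simp [PySem.Chars.split₀.go, hA, tkSum, tokC, List.map_reverse, List.sum_reverse]
    · simp only [PySem.Chars.split₀.go, h, if_false, Bool.false_eq_true]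
      simp [tkSum, hA, List.map_reverse, List.sum_reverse]
  | cons c rest ih =>
    by_cases hs : PySem.Chars.isspace c
    · by_cases h : cur.isEmpty
      · have hc : cur = [] := List.isEmpty_iff.mp h
        subst hc
        simp [PySem.Chars.split₀.go, hs, ih, hA, tokC]
      · simp only [PySem.Chars.split₀.go, hs, h, if_true, if_false, Bool.false_eq_true,
          ih [] (cur.reverse :: acc), hA]
        simp [tkSum]
        ring
    · simp [PySem.Chars.split₀.go, hs, ih, hA]

theorem tokC_long (t : List Char) (h : 2 ≤ t.length) : tokC t = 0 := by
  have h1 : t ≠ ['U'] := by intro e; subst e; simp at h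
  have h2 : t ≠ ['D'] := by intro e; subst e; simp at h
  simp [tokC, h1, h2]

theorem hA_scan (cs : List Char) (cur : List Char) :
    hA cs cur
      = (if PySem.Chars.isspace (cs.headD ' ') then tokC cur.reverse else 0)
          + scanB cur.isEmpty cs := by
  induction cs generalizing cur with
  | nil => simp [hA, scanB, PySem.Chars.isspace]
  | cons c rest ih =>
    by_cases hs : PySem.Chars.isspace c
    · have hud : udc c = 0 := udc_space c hs
      simp [hA, hs, scanB, ih [], tokC, hud]
    · rcases cur with _ | ⟨a, t⟩
      · simp [hA, hs, ih, scanB, tokC, udc]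
      · have h0 : tokC (t.reverse ++ [a, c]) = 0 := tokC_long _ (by simp)
        simp [hA, hs, ih, scanB, h0]

theorem win_eq (cs : List Char) (prev : Char) :
    (prev :: (cs ++ [' '])).zip ((cs ++ [' ']).zip ((cs ++ [' ']).drop 1))
      = win prev cs := by
  induction cs generalizing prev with
  | nil => simp [win]
  | cons c rest ih =>
    rcases rest with _ | ⟨d, rest'⟩
    · simp [win]
    · simpa [win] using ih (prev := c)

theorem winfold (cs : List Char) (prev : Char) (z : Int) :
    (win prev cs).foldl (fun total t =>
        if PySem.Chars.isspace t.1 && PySem.Chars.isspace t.2.2 then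
          if t.2.1 == 'U' then total + 1
          else if t.2.1 == 'D' then total - 1
          else total
        else total) z
      = z + scanB (PySem.Chars.isspace prev) cs := by
  induction cs generalizing prev z with
  | nil => simp [win, scanB]
  | cons c rest ih =>
    simp only [win, List.foldl_cons, ih, scanB]
    by_cases h1 : PySem.Chars.isspace prev <;>
      by_cases h2 : PySem.Chars.isspace (rest.headD ' ') <;>
        simp [h1, h2, udc] <;> split_ifs <;> simp_all <;> ring

-- ===== VERDICT (by name: the statement is the Claim_ definition above) =====
theorem calculate_floor_spec : Claim_equal_calculate_floor := by
  intro s _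
  unfold Spec_calculate_floor calculate_floor calculate_floor_alt
  simp only [PySem.Str.split₀, PySem.Chars.split₀]
  rw [foldl_tokens, tkSum_go, hA_scan]
  simp only [List.cons_append, List.drop_succ_cons, List.drop_zero]
  rw [win_eq, winfold]
  simp [tkSum, tokC, PySem.Chars.isspace]
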